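-- pv_equiv track=rewrite | github.com/mariabv/MariaVillafranca_labb321 | overrovarsprak.py | rovarsprak
-- ===== SOURCE A (Python) =====
-- def rovarsprak(inrad):
-- 	vokaler = 'aouaeiyaoAOUaEIYao'
-- 	konsonanter = 'bcdfghjklmnpqrstvwxzBCDFGHJKLMNPQRSTVWXZ'
-- 	utr = ""
-- 	i = 0
-- 	for s in inrad:
-- 		if s in konsonanter and i == 0:
-- 			utr += s
-- 			i = 2
-- 		elif i == 0:
-- 			utr += s
-- 		else:
-- 			i -= 1
-- 	return utr
-- ===== SOURCE B (Python) =====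
-- def rovarsprak(inrad):
--     konsonanter = 'bcdfghjklmnpqrstvwxzBCDFGHJKLMNPQRSTVWXZ'
--     out = []
--     idx = 0
--     n = len(inrad)
--     while idx < n:
--         s = inrad[idx]
--         out.append(s)
--         idx += 3 if s in konsonanter else 1
--     return ''.join(out)
-- ===== Notes on version B (the rewrite author's own statement) =====
-- stated objective: simpler
-- what changed: Replaces the per-character skip-counter state machine (which visits every character and decrements a countdown) with an index-jump while loop that advances 3 past a consonant, so skipped characters are never read, collecting output in a list joined once.
import Mathlib
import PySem

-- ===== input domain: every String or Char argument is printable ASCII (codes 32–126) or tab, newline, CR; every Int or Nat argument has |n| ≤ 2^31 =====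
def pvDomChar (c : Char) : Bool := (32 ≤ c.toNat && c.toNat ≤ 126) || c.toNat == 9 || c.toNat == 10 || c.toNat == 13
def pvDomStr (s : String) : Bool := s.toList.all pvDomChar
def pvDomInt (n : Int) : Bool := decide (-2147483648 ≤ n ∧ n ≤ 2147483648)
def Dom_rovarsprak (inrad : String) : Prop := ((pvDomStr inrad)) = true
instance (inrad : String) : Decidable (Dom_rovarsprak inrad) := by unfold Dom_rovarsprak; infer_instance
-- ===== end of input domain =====

-- B replaces A's skip-counter state machine by an index-jump loop (skipped characters are
-- never read); objective: simpler. Return values proved equal on all of Dom.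

-- ===== PORT A =====
def pvKons : List Char := "bcdfghjklmnpqrstvwxzBCDFGHJKLMNPQRSTVWXZ".toList

-- the for-loop of A: state (utr, i), one step per character
def pvALoop : List Char → List Char → Nat → List Char
  | [], utr, _ => utr
  | s :: rest, utr, i =>
    if pvKons.contains s && i == 0 then pvALoop rest (utr ++ [s]) 2
    else if i == 0 then pvALoop rest (utr ++ [s]) i
    else pvALoop rest utr (i - 1)

def rovarsprak (inrad : String) : String :=
  String.mk (pvALoop inrad.toList [] 0)

-- ===== PORT B =====
-- the while-loop of B: index idx over the fixed list, output accumulator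
def pvBLoop (l : List Char) (idx : Nat) (out : List Char) : List Char :=
  if h : idx < l.length then
    let s := l[idx]
    pvBLoop l (idx + (if pvKons.contains s then 3 else 1)) (out ++ [s])
  else out
termination_by l.length - idx
decreasing_by split <;> omega

def rovarsprak_alt (inrad : String) : String :=
  String.mk (pvBLoop inrad.toList 0 [])

-- ===== PRECONDITION & SPEC =====
def Spec_rovarsprak (inrad : String) (out : String) : Prop := out = rovarsprak_alt inrad
instance (inrad : String) (out : String) : Decidable (Spec_rovarsprak inrad out) := by unfold Spec_rovarsprak; infer_instance

-- ===== CLAIM (what is proved, stated in full; the proofs are below) =====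
def Claim_equal_rovarsprak : Prop := ∀ (inrad : String), Dom_rovarsprak inrad → Spec_rovarsprak inrad (rovarsprak inrad)

-- ===== LEMMAS AND PROOFS =====

-- reference function both loops are reduced to
def pvF : List Char → List Char
  | [] => []
  | s :: rest => s :: pvF (if pvKons.contains s then rest.drop 2 else rest)
termination_by l => l.length
decreasing_by
  split <;> simp

-- A's counter i>0 merely skips the next i characters
theorem pvALoop_skip (i : Nat) : ∀ (l utr : List Char), pvALoop l utr i = pvALoop (l.drop i) utr 0 := by
  induction i with
  | zero => intro l utr; simp
  | succ n ih =>
    intro l utr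
    cases l with
    | nil => simp [pvALoop]
    | cons s rest =>
      simp only [pvALoop, List.drop_succ_cons]
      rw [if_neg (by simp), if_neg (by simp)]
      simpa using ih rest utr

theorem pvALoop_eq_pvF : ∀ (n : Nat) (l : List Char), l.length = n →
    ∀ utr, pvALoop l utr 0 = utr ++ pvF l := by
  intro n
  induction n using Nat.strong_induction_on with
  | _ n ih =>
    intro l hl utr
    cases l with
    | nil => simp [pvALoop, pvF]
    | cons s rest =>
      rw [pvF]
      by_cases hk : pvKons.contains s
      · simp only [List.contains_iff_mem] at hk
        rw [pvALoop, if_pos (by simp [hk]), pvALoop_skip,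
          ih ((rest.drop 2).length) (by simp at hl ⊢; omega) _ rfl]
        simp [hk]
      · simp only [List.contains_iff_mem] at hk
        rw [pvALoop, if_neg (by simp [hk]), if_pos (by decide),
          ih rest.length (by simp at hl ⊢; omega) _ rfl]
        simp [hk]

theorem pvBLoop_eq_pvF (l : List Char) : ∀ (n idx : Nat), l.length - idx = n →
    ∀ out, pvBLoop l idx out = out ++ pvF (l.drop idx) := by
  intro n
  induction n using Nat.strong_induction_on with
  | _ n ih =>
    intro idx hn out
    by_cases h : idx < l.length
    · rw [pvBLoop.eq_def, dif_pos h]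
      have hd : l.drop idx = l[idx] :: l.drop (idx + 1) := List.drop_eq_getElem_cons h
      show pvBLoop l (idx + (if pvKons.contains l[idx] then 3 else 1)) (out ++ [l[idx]]) = _
      by_cases hk : pvKons.contains l[idx]
      · rw [if_pos hk, ih (l.length - (idx + 3)) (by omega) (idx + 3) rfl, hd, pvF]
        simp only [List.contains_iff_mem] at hk
        simp [hk, show idx + 3 = (idx + 1) + 2 by omega, List.drop_drop]
      · rw [if_neg hk, ih (l.length - (idx + 1)) (by omega) (idx + 1) rfl, hd, pvF]
        simp only [List.contains_iff_mem] at hk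
        simp [hk]
    · rw [pvBLoop.eq_def, dif_neg h, List.drop_eq_nil_of_le (by omega)]
      simp [pvF]

-- ===== VERDICT (by name: the statement is the Claim_ definition above) =====
theorem rovarsprak_spec : Claim_equal_rovarsprak := by
  intro inrad _
  show rovarsprak inrad = rovarsprak_alt inrad
  unfold rovarsprak rovarsprak_alt
  rw [pvALoop_eq_pvF _ _ rfl, pvBLoop_eq_pvF _ _ _ rfl]
  simp
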